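-- pv_equiv track=rewrite | github.com/kkShrihari/Python | Structural_Bioinformatics/Atomic_composition.py | hetero_atom_residue_counter
-- ===== SOURCE A (Python) =====
-- def hetero_atom_residue_counter(heteroatom_lines):
--
--     hetero_atom_composition = {}
--     aminoacid_list1 = []
--     aminoacid_list2 = []
--     counts_list = []
--     for datas in heteroatom_lines:
--         trim = str(datas[17:20])
--         aminoacid_list1.append(trim)
--         #if trim == "HOH":
--     for codons in aminoacid_list1:
--         if codons not in aminoacid_list2:
--             count = aminoacid_list1.count(codons)
--             counts_list.append(count)
--             aminoacid_list2.append(codons)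
--         else:
--             continue
--
--     zipping = zip(aminoacid_list2,counts_list)
--     hetero_atom_composition = dict(list(zipping))
--     return hetero_atom_composition
-- ===== SOURCE B (Python) =====
-- def hetero_atom_residue_counter(heteroatom_lines):
--     # one pass: increment a running tally per residue, first-appearance order (simpler than the two-pass count-and-zip)
--     hetero_atom_composition = {}
--     for datas in heteroatom_lines:
--         residue = str(datas[17:20])
--         hetero_atom_composition[residue] = hetero_atom_composition.get(residue, 0) + 1
--     return hetero_atom_composition
-- ===== Notes on version B (the rewrite author's own statement) =====
-- stated objective: simpler
-- what changed: Replaces A's two-pass scheme (build the residue list, then a dedup loop calling a full-list .count() per new key and a final zip/dict) by a single pass that increments a per-residue tally in a dict built once.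
import Mathlib
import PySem

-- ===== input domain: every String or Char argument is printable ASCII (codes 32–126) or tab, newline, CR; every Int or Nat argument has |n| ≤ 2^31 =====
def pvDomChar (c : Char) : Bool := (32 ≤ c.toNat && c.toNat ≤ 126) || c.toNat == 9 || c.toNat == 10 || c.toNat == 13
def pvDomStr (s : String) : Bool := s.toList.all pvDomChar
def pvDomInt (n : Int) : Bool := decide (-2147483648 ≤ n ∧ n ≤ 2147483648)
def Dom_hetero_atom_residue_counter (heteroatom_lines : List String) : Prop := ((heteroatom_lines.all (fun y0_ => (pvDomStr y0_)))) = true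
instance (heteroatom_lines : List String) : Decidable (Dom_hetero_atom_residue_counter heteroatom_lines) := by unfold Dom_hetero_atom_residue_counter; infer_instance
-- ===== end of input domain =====

-- B replaces A's two-pass count-and-zip scheme by a single counting pass over the lines
-- with a tally dict in first-appearance order; simpler.


-- ===== PORT A =====
-- literal port of A: list of residues, dedup loop with full-list .count, zip, dict
def hetero_atom_residue_counter (heteroatom_lines : List String) : List (String × Int) :=
  -- aminoacid_list1: for datas in heteroatom_lines: append str(datas[17:20])
  let aminoacid_list1 : List String :=
    heteroatom_lines.foldl (fun acc datas => acc ++ [PySem.Str.slice datas (some 17) (some 20)]) []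
  -- second loop: state (aminoacid_list2, counts_list)
  let st : List String × List Int :=
    aminoacid_list1.foldl
      (fun acc codons =>
        if acc.1.contains codons then acc
        else (acc.1 ++ [codons], acc.2 ++ [(PySem.List.count aminoacid_list1 codons : Int)]))
      ([], [])
  -- dict(list(zip(aminoacid_list2, counts_list)))
  (PySem.Dict.ofList (st.1.zip st.2)).items

-- ===== PORT B =====
def hetero_atom_residue_counter_alt (heteroatom_lines : List String) : List (String × Int) :=
  -- one pass: composition[residue] = composition.get(residue, 0) + 1
  (heteroatom_lines.foldl
    (fun d datas =>
      let residue := PySem.Str.slice datas (some 17) (some 20)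
      d.insert residue (d.getD residue 0 + 1))
    PySem.Dict.empty).items

-- ===== PRECONDITION & SPEC =====
def Spec_hetero_atom_residue_counter (heteroatom_lines : List String) (out : List (String × Int)) : Prop := out = hetero_atom_residue_counter_alt heteroatom_lines
instance (heteroatom_lines : List String) (out : List (String × Int)) : Decidable (Spec_hetero_atom_residue_counter heteroatom_lines out) := by unfold Spec_hetero_atom_residue_counter; infer_instance

-- ===== CLAIM (what is proved, stated in full; the proofs are below) =====
def Claim_equal_hetero_atom_residue_counter : Prop := ∀ (heteroatom_lines : List String), Dom_hetero_atom_residue_counter heteroatom_lines → Spec_hetero_atom_residue_counter heteroatom_lines (hetero_atom_residue_counter heteroatom_lines)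

-- ===== LEMMAS AND PROOFS =====

-- A's second loop maintains the invariant: the pair is (S, S.map f) for the seen-set S.
lemma pv_loopA (f : String → Int) :
    ∀ (l s : List String),
      l.foldl
        (fun acc c => if acc.1.contains c then acc else (acc.1 ++ [c], acc.2 ++ [f c]))
        (s, s.map f)
      = (PySem.Set.update s l, (PySem.Set.update s l).map f) := by
  intro l
  induction l with
  | nil => intro s; rfl
  | cons c t ih =>
    intro s
    by_cases h : s.contains c = true
    · rw [List.foldl_cons, if_pos h]
      have hc : c ∈ s := by simpa using h
      have hadd : PySem.Set.add s c = s := by simp [PySem.Set.add, PySem.Set.contains, hc]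
      have := ih s
      simpa [PySem.Set.update, hadd] using this
    · rw [List.foldl_cons, if_neg h]
      have hc : c ∉ s := by simpa using h
      have hadd : PySem.Set.add s c = s ++ [c] := by
        simp [PySem.Set.add, PySem.Set.contains, hc]
      have := ih (s ++ [c])
      simpa [PySem.Set.update, hadd, List.map_append] using this

lemma pv_count_eq (l : List String) (x : String) :
    PySem.List.count l x = l.count x := by
  rfl

-- ===== VERDICT (by name: the statement is the Claim_ definition above) =====
theorem hetero_atom_residue_counter_spec : Claim_equal_hetero_atom_residue_counter := by
  intro lines _
  unfold Spec_hetero_atom_residue_counter hetero_atom_residue_counter hetero_atom_residue_counter_alt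
  have h1 : lines.foldl (fun acc datas => acc ++ [PySem.Str.slice datas (some 17) (some 20)]) []
      = lines.map (fun s => PySem.Str.slice s (some 17) (some 20)) := by
    simpa using PySem.List.foldl_append_singleton_eq_map
      (l := lines) (f := fun s => PySem.Str.slice s (some 17) (some 20)) (acc := [])
  simp only [h1]
  -- B side is Counter(res)
  have hB : (lines.foldl
      (fun d datas => d.insert (PySem.Str.slice datas (some 17) (some 20))
        (d.getD (PySem.Str.slice datas (some 17) (some 20)) 0 + 1)) PySem.Dict.empty)
      = PySem.Dict.counter (lines.map (fun s => PySem.Str.slice s (some 17) (some 20))) :=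
    (List.foldl_map (f := fun s => PySem.Str.slice s (some 17) (some 20))
      (g := fun (d : PySem.Dict String Int) x => d.insert x (d.getD x 0 + 1)) (l := lines)
      (init := PySem.Dict.empty)).symm.trans
      (PySem.Dict.foldl_insert_getD_add_one_eq_counter _)
  rw [hB]
  generalize lines.map (fun s => PySem.Str.slice s (some 17) (some 20)) = res
  -- A side: the second loop yields (S, S.map count)
  have hloop := pv_loopA (fun k => (PySem.List.count res k : Int)) res []
  simp only [List.map_nil] at hloop
  have hup : PySem.Set.update ([] : List String) res = PySem.Set.ofList res := rfl
  rw [hup] at hloop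
  rw [hloop]
  have hzip : (PySem.Set.ofList res).zip ((PySem.Set.ofList res).map (fun k => (PySem.List.count res k : Int)))
      = (PySem.Set.ofList res).map (fun k => (k, (PySem.List.count res k : Int))) := by
    simpa using List.zip_map' (f := fun (a : String) => a)
      (g := fun k => (PySem.List.count res k : Int)) (l := PySem.Set.ofList res)
  have hfresh : (PySem.Dict.ofList ((PySem.Set.ofList res).map (fun k => (k, (PySem.List.count res k : Int))))).items
      = (PySem.Set.ofList res).map (fun k => (k, (PySem.List.count res k : Int))) := by
    have h := PySem.Dict.items_foldl_insert_fresh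
      (l := (PySem.Set.ofList res).map (fun k => (k, (PySem.List.count res k : Int))))
      (k := Prod.fst) (v := Prod.snd) (d := PySem.Dict.empty)
      (by intro a _; simp [PySem.Dict.contains_empty])
      (by
        have hm : ((PySem.Set.ofList res).map (fun k => (k, (PySem.List.count res k : Int)))).map Prod.fst
            = PySem.Set.ofList res := by
          simp [List.map_map, Function.comp_def]
        rw [hm]; exact PySem.Set.nodup_ofList res)
    simpa [PySem.Dict.ofList] using h
  rw [hzip, hfresh, PySem.Dict.items_counter]
  simp only [pv_count_eq]
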